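-- pv_equiv track=rewrite | github.com/CTCskilltaskforce/DifyRagMnger | src/lib/converter.py | filter_consecutive_empty_table_rows
-- ===== SOURCE A (Python) =====
-- from typing import List, Optional
--
-- def _is_empty_table_line(line: str) -> bool:
--     """テーブル行が空白行かどうかを判定する。
--
--     Args:
--         line: Markdownテーブルの行
--
--     Returns:
--         空白行の場合True
--     """
--     if not line or line.strip() == "":
--         return True
--
--     # Markdownテーブル形式の空白行を判定
--     # 例: | | | | (空白セルのみのテーブル行)
--     if line.startswith("|") and line.endswith("|"):
--         # パイプ区切りの内容を取得
--         cells = [cell.strip() for cell in line.split("|")[1:-1]]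
--         return all(cell == "" for cell in cells)
--
--     return False
--
-- def filter_consecutive_empty_table_rows(table_lines: List[str]) -> List[str]:
--     """テーブル行から連続する空白行を単一の空白行に集約する。
--
--     Args:
--         table_lines: Markdownテーブルの行のリスト
--
--     Returns:
--         フィルタリングされた行のリスト
--     """
--     if not table_lines:
--         return table_lines
--
--     filtered_lines = []
--     prev_was_empty = False
--
--     for line in table_lines:
--         is_current_empty = _is_empty_table_line(line)
--
--         if is_current_empty:
--             if not prev_was_empty:
--                 # 最初の空白行のみ追加
--                 filtered_lines.append(line)
--             # 連続する空白行はスキップ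
--         else:
--             # 非空白行は常に追加
--             filtered_lines.append(line)
--
--         prev_was_empty = is_current_empty
--
--     return filtered_lines
-- ===== SOURCE B (Python) =====
-- from itertools import groupby
-- from typing import List
--
--
-- def _is_empty_table_line(line: str) -> bool:
--     if not line or line.strip() == "":
--         return True
--     if line.startswith("|") and line.endswith("|"):
--         cells = [cell.strip() for cell in line.split("|")[1:-1]]
--         return all(cell == "" for cell in cells)
--     return False
--
--
-- def filter_consecutive_empty_table_rows(table_lines: List[str]) -> List[str]:
--     if not table_lines:
--         return table_lines
--     result: List[str] = []
--     for is_empty, group in groupby(table_lines, key=_is_empty_table_line):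
--         if is_empty:
--             result.append(next(group))
--         else:
--             result.extend(group)
--     return result
-- ===== Notes on version B (the rewrite author's own statement) =====
-- stated objective: idiomatic
-- what changed: Replaces the manual prev_was_empty boolean state machine with itertools.groupby over maximal runs: keep the first line of each empty run and every line of each non-empty run.
import Mathlib
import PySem

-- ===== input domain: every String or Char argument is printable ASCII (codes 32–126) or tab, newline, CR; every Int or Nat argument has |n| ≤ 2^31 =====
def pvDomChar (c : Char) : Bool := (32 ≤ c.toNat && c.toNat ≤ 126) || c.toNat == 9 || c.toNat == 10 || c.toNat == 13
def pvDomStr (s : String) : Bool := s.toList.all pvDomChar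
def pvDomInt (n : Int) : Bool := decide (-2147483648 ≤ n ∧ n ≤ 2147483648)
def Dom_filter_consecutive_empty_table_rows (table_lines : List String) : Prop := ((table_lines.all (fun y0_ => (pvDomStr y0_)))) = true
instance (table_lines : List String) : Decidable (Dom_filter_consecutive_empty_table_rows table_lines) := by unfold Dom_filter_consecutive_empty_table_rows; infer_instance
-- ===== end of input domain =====

-- B is the same collapse expressed with itertools.groupby over maximal runs (idiomatic decomposition, same cost).

-- ===== PORT A =====
-- shared helper _is_empty_table_line (identical in both Python sources)
def pvIsEmptyTableLine (line : String) : Bool :=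
  if line == "" || PySem.Str.strip line == "" then true
  else if PySem.Str.startswith line "|" && PySem.Str.endswith line "|" then
    -- cells = [cell.strip() for cell in line.split("|")[1:-1]]  (sep "|" ≠ "", so split? is some)
    let cells := (PySem.List.slice ((PySem.Str.split? line "|").getD []) (some 1) (some (-1))).map PySem.Str.strip
    cells.all (fun cell => cell == "")
  else false

def filter_consecutive_empty_table_rows (table_lines : List String) : List String :=
  if table_lines = [] then table_lines
  else
    (table_lines.foldl
      (fun (st : List String × Bool) line =>
        let ice := pvIsEmptyTableLine line
        (if ice then (if !st.2 then st.1 ++ [line] else st.1) else st.1 ++ [line], ice))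
      ([], false)).1

-- ===== PORT B =====
-- itertools.groupby(table_lines, key=_is_empty_table_line): maximal runs of equal key
def pvGroupby (ts : List String) : List (Bool × List String) :=
  match ts with
  | [] => []
  | l :: ls =>
    let k := pvIsEmptyTableLine l
    (k, l :: ls.takeWhile (fun x => pvIsEmptyTableLine x == k)) ::
      pvGroupby (ls.dropWhile (fun x => pvIsEmptyTableLine x == k))
termination_by ts.length
decreasing_by
  simpa using Nat.lt_succ_of_le (ls.length_dropWhile_le _)

def filter_consecutive_empty_table_rows_alt (table_lines : List String) : List String :=
  if table_lines = [] then table_lines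
  else
    (pvGroupby table_lines).foldl
      (fun result g => if g.1 then result ++ g.2.take 1 else result ++ g.2) []

-- ===== PRECONDITION & SPEC =====
def Spec_filter_consecutive_empty_table_rows (table_lines : List String) (out : List String) : Prop := out = filter_consecutive_empty_table_rows_alt table_lines
instance (table_lines : List String) (out : List String) : Decidable (Spec_filter_consecutive_empty_table_rows table_lines out) := by unfold Spec_filter_consecutive_empty_table_rows; infer_instance

-- ===== CLAIM (what is proved, stated in full; the proofs are below) =====
def Claim_equal_filter_consecutive_empty_table_rows : Prop := ∀ (table_lines : List String), Dom_filter_consecutive_empty_table_rows table_lines → Spec_filter_consecutive_empty_table_rows table_lines (filter_consecutive_empty_table_rows table_lines)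

-- ===== LEMMAS AND PROOFS =====

-- A's loop as a structural recursion on (list, prev_was_empty)
def pvGo : List String → Bool → List String
  | [], _ => []
  | l :: ls, prev =>
    if pvIsEmptyTableLine l then
      (if !prev then l :: pvGo ls true else pvGo ls true)
    else l :: pvGo ls false

theorem pvFoldl_eq_pvGo (ts : List String) (acc : List String) (prev : Bool) :
    (ts.foldl
      (fun (st : List String × Bool) line =>
        let ice := pvIsEmptyTableLine line
        (if ice then (if !st.2 then st.1 ++ [line] else st.1) else st.1 ++ [line], ice))
      (acc, prev)).1 = acc ++ pvGo ts prev := by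
  induction ts generalizing acc prev with
  | nil => simp [pvGo]
  | cons l ls ih =>
    rw [List.foldl_cons]
    show (List.foldl _
      ((if pvIsEmptyTableLine l then (if !prev then acc ++ [l] else acc) else acc ++ [l]),
        pvIsEmptyTableLine l) ls).1 = acc ++ pvGo (l :: ls) prev
    by_cases h : pvIsEmptyTableLine l = true <;> cases prev <;>
      simp only [h, Bool.not_true, Bool.not_false, if_true, if_false,
        Bool.false_eq_true, pvGo, ih] <;> simp

-- flatten form of B's foldl
theorem pvFoldl_groups (rs : List (Bool × List String)) (acc : List String) :
    rs.foldl (fun result g => if g.1 then result ++ g.2.take 1 else result ++ g.2) acc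
      = acc ++ (rs.map (fun g => if g.1 then g.2.take 1 else g.2)).flatten := by
  induction rs generalizing acc with
  | nil => simp
  | cons r rs ih => by_cases h : r.1 = true <;> simp [h, ih]

theorem pvGo_true (ls : List String) :
    pvGo ls true = pvGo (ls.dropWhile pvIsEmptyTableLine) false := by
  induction ls with
  | nil => rfl
  | cons l ls ih =>
    by_cases h : pvIsEmptyTableLine l = true <;>
      simp [pvGo, h, ih]
theorem pvGo_false_run (ls : List String) :
    pvGo ls false = ls.takeWhile (fun x => !pvIsEmptyTableLine x)
      ++ pvGo (ls.dropWhile (fun x => !pvIsEmptyTableLine x)) false := by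
  induction ls with
  | nil => rfl
  | cons l ls ih =>
    by_cases h : pvIsEmptyTableLine l = true <;>
      simp [pvGo, h]
    exact ih
theorem pvGo_eq_flat : ∀ n ts, ts.length ≤ n →
    pvGo ts false = ((pvGroupby ts).map (fun g => if g.1 then g.2.take 1 else g.2)).flatten := by
  intro n
  induction n with
  | zero =>
    intro ts h
    have : ts = [] := List.eq_nil_of_length_eq_zero (Nat.le_zero.mp h)
    subst this; rw [pvGroupby]; rfl
  | succ n ih =>
    intro ts h
    cases ts with
    | nil => rw [pvGroupby]; rfl
    | cons l ls =>
      rw [pvGroupby]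
      by_cases hl : pvIsEmptyTableLine l = true
      · have hpred : (fun x => pvIsEmptyTableLine x == true)
            = pvIsEmptyTableLine := by
          funext x; cases pvIsEmptyTableLine x <;> simp
        rw [pvGo, if_pos hl]
        simp only [hl, hpred, List.map_cons, List.flatten_cons, if_true, Bool.not_false,
          List.take_succ_cons, List.take_zero, List.singleton_append]
        rw [pvGo_true]
        exact congrArg _ (ih _ (le_trans (ls.length_dropWhile_le _) (Nat.le_of_succ_le_succ h)))
      · have hl' : pvIsEmptyTableLine l = false := Bool.eq_false_iff.mpr hl
        have hpred : (fun x => pvIsEmptyTableLine x == false)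
            = (fun x => !pvIsEmptyTableLine x) := by
          funext x; cases pvIsEmptyTableLine x <;> simp
        rw [pvGo, if_neg hl]
        simp only [hl', hpred, List.map_cons, List.flatten_cons, if_false, Bool.false_eq_true,
          List.cons_append]
        rw [pvGo_false_run ls]
        exact congrArg _ (congrArg _
          (ih _ (le_trans (ls.length_dropWhile_le _) (Nat.le_of_succ_le_succ h))))

-- ===== VERDICT (by name: the statement is the Claim_ definition above) =====
theorem filter_consecutive_empty_table_rows_spec : Claim_equal_filter_consecutive_empty_table_rows := by
  intro ts _
  unfold Spec_filter_consecutive_empty_table_rows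
  unfold filter_consecutive_empty_table_rows filter_consecutive_empty_table_rows_alt
  by_cases h : ts = []
  · simp [h]
  · rw [if_neg h, if_neg h, pvFoldl_eq_pvGo, pvFoldl_groups]
    simpa using pvGo_eq_flat ts.length ts le_rfl
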